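-- pv_equiv track=rewrite | github.com/copperdogma/doc-web | modules/adapter/reconstruct_text_v1/main.py | merge_lines_with_hyphen_handling
-- ===== SOURCE A (Python) =====
-- from typing import Dict, List, Optional
--
-- def merge_lines_with_hyphen_handling(text_parts: List[str]) -> str:
--     """
--     Merge text parts with proper hyphen handling.
--
--     Rules:
--     - If a line ends with a hyphen (not double hyphen), remove the hyphen and merge without space
--     - Otherwise, add a space between lines (words typically aren't broken over lines)
--
--     Example:
--     - ["twenty-", "metre"] → "twentymetre" (hyphen removed, no space)
--     - ["twenty", "metre"] → "twenty metre" (space added)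
--     """
--     if not text_parts:
--         return ""
--
--     result_parts = []
--     for i, part in enumerate(text_parts):
--         part = part.strip()
--         if not part:
--             continue
--
--         # Check if previous part ended with hyphen (not double hyphen)
--         if result_parts and result_parts[-1].endswith('-') and not result_parts[-1].endswith('--'):
--             # Remove hyphen from previous part and merge without space
--             result_parts[-1] = result_parts[-1][:-1] + part
--         else:
--             # Add space before this part (unless it's the first part)
--             if result_parts:
--                 result_parts.append(" " + part)
--             else:
--                 result_parts.append(part)
--
--     return "".join(result_parts)
-- ===== SOURCE B (Python) =====
-- from typing import List
--
--
-- def merge_lines_with_hyphen_handling(text_parts: List[str]) -> str: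
--     cleaned = [q for q in (p.strip() for p in text_parts) if q]
--     if not cleaned:
--         return ""
--     result = cleaned[0]
--     for prev, cur in zip(cleaned, cleaned[1:]):
--         if prev.endswith('-') and not prev.endswith('--'):
--             result = result[:-1] + cur
--         else:
--             result += ' ' + cur
--     return result
-- ===== Notes on version B (the rewrite author's own statement) =====
-- stated objective: simpler
-- what changed: B first cleans the input into a list of stripped non-empty parts, then builds one accumulator string deciding each boundary from the PREVIOUS INPUT part (pairwise zip lookahead), instead of A's list of result chunks whose mutable last element is inspected and rewritten.
import Mathlib
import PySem

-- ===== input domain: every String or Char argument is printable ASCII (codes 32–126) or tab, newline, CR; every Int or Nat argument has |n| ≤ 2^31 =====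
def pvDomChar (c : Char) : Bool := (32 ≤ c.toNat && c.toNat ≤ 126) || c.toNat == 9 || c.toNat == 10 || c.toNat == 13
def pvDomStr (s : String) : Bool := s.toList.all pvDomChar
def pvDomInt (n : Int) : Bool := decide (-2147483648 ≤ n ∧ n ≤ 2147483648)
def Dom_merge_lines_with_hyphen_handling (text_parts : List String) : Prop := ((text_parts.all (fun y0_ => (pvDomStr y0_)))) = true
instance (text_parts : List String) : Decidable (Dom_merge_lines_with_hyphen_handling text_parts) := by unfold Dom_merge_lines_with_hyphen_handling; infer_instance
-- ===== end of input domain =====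

-- B rebuilds the merged string from the cleaned input list, deciding each boundary from the
-- previous input part (pairwise lookahead) instead of A's mutable list of result chunks; same cost.


-- ===== PORT A =====
-- loop body of A: strip the part, skip if empty, else merge into / append to result_parts
def pvAStep (result_parts : List String) (part0 : String) : List String :=
  let part := PySem.Str.strip part0
  if part = "" then result_parts
  else
    match result_parts.getLast? with
    | some last =>
      if PySem.Str.endswith last "-" && !(PySem.Str.endswith last "--") then
        result_parts.dropLast ++ [PySem.Str.slice last none (some (-1)) ++ part]
      else result_parts ++ [" " ++ part]
    | none => result_parts ++ [part]

def merge_lines_with_hyphen_handling (text_parts : List String) : String :=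
  if text_parts = [] then ""
  else PySem.Str.join "" (text_parts.foldl pvAStep [])

-- ===== PORT B =====
-- loop body of B: state = (result so far, previous cleaned part)
def pvBStep (st : String × String) (cur : String) : String × String :=
  if PySem.Str.endswith st.2 "-" && !(PySem.Str.endswith st.2 "--") then
    (PySem.Str.slice st.1 none (some (-1)) ++ cur, cur)
  else (st.1 ++ " " ++ cur, cur)

def merge_lines_with_hyphen_handling_alt (text_parts : List String) : String :=
  let cleaned := (text_parts.map PySem.Str.strip).filter (fun q => q ≠ "")
  match cleaned with
  | [] => ""
  | c0 :: rest => (rest.foldl pvBStep (c0, c0)).1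

-- ===== PRECONDITION & SPEC =====
def Spec_merge_lines_with_hyphen_handling (text_parts : List String) (out : String) : Prop := out = merge_lines_with_hyphen_handling_alt text_parts
instance (text_parts : List String) (out : String) : Decidable (Spec_merge_lines_with_hyphen_handling text_parts out) := by unfold Spec_merge_lines_with_hyphen_handling; infer_instance

-- ===== CLAIM (what is proved, stated in full; the proofs are below) =====
def Claim_equal_merge_lines_with_hyphen_handling : Prop := ∀ (text_parts : List String), Dom_merge_lines_with_hyphen_handling text_parts → Spec_merge_lines_with_hyphen_handling text_parts (merge_lines_with_hyphen_handling text_parts)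

-- ===== LEMMAS AND PROOFS =====

-- char-level versions of the two loop bodies
def hyC (cs : List Char) : Bool :=
  PySem.Chars.endswith cs ['-'] && !(PySem.Chars.endswith cs ['-', '-'])

def stepAC (L : List (List Char)) (q : List Char) : List (List Char) :=
  match L.getLast? with
  | some last => if hyC last then L.dropLast ++ [last.dropLast ++ q] else L ++ [' ' :: q]
  | none => L ++ [q]

def stepBC (st : List Char × List Char) (q : List Char) : List Char × List Char :=
  if hyC st.2 then (st.1.dropLast ++ q, q) else (st.1 ++ ' ' :: q, q)

def cleanedC (parts : List String) : List (List Char) :=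
  (parts.map (fun p => PySem.Chars.strip p.toList)).filter (fun q => q ≠ [])

lemma endswith_one (cs : List Char) (a : Char) :
    PySem.Chars.endswith cs [a] = (cs.getLast? == some a) := by
  simp only [PySem.Chars.endswith, List.isSuffixOf, List.reverse_singleton,
    List.getLast?_eq_head?_reverse]
  cases h : cs.reverse with
  | nil => simp [List.isPrefixOf]
  | cons b t => simp [List.isPrefixOf, eq_comm]

lemma endswith_two (cs : List Char) (a b : Char) :
    PySem.Chars.endswith cs [a, b]
      = ((cs.dropLast.getLast? == some a) && (cs.getLast? == some b)) := by
  have hd : cs.dropLast.getLast? = cs.reverse.tail.head? := by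
    rw [List.getLast?_eq_head?_reverse]
    congr 1
    cases cs using List.reverseRecOn <;> simp
  rw [hd, List.getLast?_eq_head?_reverse]
  simp only [PySem.Chars.endswith, List.isSuffixOf]
  cases h : cs.reverse with
  | nil => simp
  | cons c t => cases t with
    | nil => simp [List.isPrefixOf]
    | cons d u =>
      show ([b, a].isPrefixOf (c :: d :: u)) = _
      simp [List.isPrefixOf, Bool.and_comm, BEq.comm]

lemma hyC_eq (cs : List Char) :
    hyC cs = ((cs.getLast? == some '-') && !(cs.dropLast.getLast? == some '-')) := by
  rw [hyC, endswith_one, endswith_two]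
  cases h1 : cs.getLast? == some '-' <;> cases h2 : cs.dropLast.getLast? == some '-' <;> simp_all

lemma hyC_true (cs : List Char) (h : hyC cs = true) :
    cs.getLast? = some '-' ∧ cs.dropLast.getLast? ≠ some '-' := by
  rw [hyC_eq] at h
  constructor
  · have := (Bool.and_eq_true _ _).mp h |>.1
    exact beq_iff_eq.mp this
  · have := (Bool.and_eq_true _ _).mp h |>.2
    simpa using this

lemma hyC_append (xs q : List Char) (hq : q ≠ []) (hxs : xs.getLast? ≠ some '-') :
    hyC (xs ++ q) = hyC q := by
  rw [hyC_eq, hyC_eq, List.getLast?_append_of_ne_nil _ hq,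
    List.dropLast_append_of_ne_nil hq]
  cases hdrop : q.dropLast with
  | nil => simp [hxs]
  | cons c t =>
    rw [List.getLast?_append_of_ne_nil xs (List.cons_ne_nil c t)]

-- A's step maps to the char-level step (stated over already-stripped data)
lemma pvAStep_toList (L : List String) (p : String) :
    (pvAStep L p).map String.toList =
      (if PySem.Chars.strip p.toList = [] then L.map String.toList
       else stepAC (L.map String.toList) (PySem.Chars.strip p.toList)) := by
  have hm : "-".toList = ['-'] := rfl
  have hmm : "--".toList = ['-', '-'] := rfl
  have hsp : " ".toList = [' '] := rfl
  simp only [pvAStep, stepAC]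
  by_cases he : PySem.Str.strip p = ""
  · have : PySem.Chars.strip p.toList = [] := by
      have := congrArg String.toList he
      simpa [PySem.Str.toList_strip] using this
    simp [he, this]
  · have hne : PySem.Chars.strip p.toList ≠ [] := by
      intro h
      apply he
      have := congrArg String.toList (rfl : PySem.Str.strip p = PySem.Str.strip p)
      apply String.toList_inj.mp
      simp [PySem.Str.toList_strip, h]
    rw [if_neg he, if_neg hne]
    rw [List.getLast?_map]
    cases hL : L.getLast? with
    | none => simp [PySem.Str.toList_strip]
    | some last =>
      simp only [Option.map_some]
      have hend1 : PySem.Str.endswith last "-" = PySem.Chars.endswith last.toList ['-'] := by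
        simp [PySem.Str.endswith, hm]
      have hend2 : PySem.Str.endswith last "--" = PySem.Chars.endswith last.toList ['-','-'] := by
        simp [PySem.Str.endswith, hmm]
      rw [hend1, hend2]
      by_cases hy : hyC last.toList = true
      · rw [if_pos (by simpa [hyC] using hy), if_pos (by simpa [hyC] using hy)]
        simp [PySem.Str.slice, PySem.List.slice_to_neg_one, PySem.Str.toList_strip,
          List.map_dropLast]
      · rw [if_neg (by simpa [hyC] using hy), if_neg (by simpa [hyC] using hy)]
        simp [PySem.Str.toList_strip, hsp]

-- B's step maps to the char-level step
lemma pvBStep_toList (st : String × String) (q : String) :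
    ((pvBStep st q).1.toList, (pvBStep st q).2.toList) =
      stepBC (st.1.toList, st.2.toList) q.toList := by
  have hm : "-".toList = ['-'] := rfl
  have hmm : "--".toList = ['-', '-'] := rfl
  have hsp : " ".toList = [' '] := rfl
  simp only [pvBStep, stepBC]
  have hend1 : PySem.Str.endswith st.2 "-" = PySem.Chars.endswith st.2.toList ['-'] := by
    simp [PySem.Str.endswith, hm]
  have hend2 : PySem.Str.endswith st.2 "--" = PySem.Chars.endswith st.2.toList ['-','-'] := by
    simp [PySem.Str.endswith, hmm]
  by_cases hy : hyC st.2.toList = true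
  · rw [if_pos (by simpa [hyC, hend1, hend2] using hy), if_pos hy]
    simp [PySem.Str.slice, PySem.List.slice_to_neg_one]
  · rw [if_neg (by simpa [hyC, hend1, hend2] using hy), if_neg hy]
    simp [hsp]

lemma foldA_toList (parts : List String) (L : List String) :
    (parts.foldl pvAStep L).map String.toList =
      (cleanedC parts).foldl stepAC (L.map String.toList) := by
  induction parts generalizing L with
  | nil => simp [cleanedC]
  | cons p ps ih =>
    rw [List.foldl_cons, ih]
    by_cases he : PySem.Chars.strip p.toList = []
    · rw [pvAStep_toList, if_pos he]
      simp [cleanedC, he]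
    · rw [pvAStep_toList, if_neg he]
      simp [cleanedC, he]

lemma foldB_toList (rest : List String) (st : String × String) :
    ((rest.foldl pvBStep st).1).toList =
      ((rest.map String.toList).foldl stepBC (st.1.toList, st.2.toList)).1 := by
  induction rest generalizing st with
  | nil => rfl
  | cons q qs ih =>
    rw [List.foldl_cons, List.map_cons, List.foldl_cons, ih, ← pvBStep_toList]

lemma mainC (rest : List (List Char)) (L : List (List Char)) (res e : List Char)
    (hrest : ∀ q ∈ rest, q ≠ []) (hL : L ≠ []) (hflat : L.flatten = res)
    (hlast : ∀ last, L.getLast? = some last → hyC last = hyC e) :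
    (rest.foldl stepAC L).flatten = (rest.foldl stepBC (res, e)).1 := by
  induction rest generalizing L res e with
  | nil => simpa using hflat
  | cons q qs ih =>
    have hq : q ≠ [] := hrest q (by simp)
    obtain ⟨last, hLsome⟩ := Option.ne_none_iff_exists'.mp
      ((List.getLast?_isSome (l := L)).mpr hL |> Option.isSome_iff_ne_none.mp)
    have hhy : hyC last = hyC e := hlast last hLsome
    have hg : L.getLast hL = last := (List.getLast_eq_iff_getLast?_eq_some hL).mpr hLsome
    have hdecomp : L = L.dropLast ++ [last] := by
      rw [← hg]
      exact (List.dropLast_concat_getLast hL).symm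
    rw [List.foldl_cons, List.foldl_cons]
    simp only [stepAC, stepBC, hLsome, ← hhy]
    by_cases hy : hyC last = true
    · rw [if_pos hy, if_pos hy]
      obtain ⟨hlastc, hdl⟩ := hyC_true last hy
      have hlastne : last ≠ [] := by
        intro h; rw [h] at hlastc; simp at hlastc
      apply ih
      · intro x hx; exact hrest x (by simp [hx])
      · simp
      · rw [← hflat]
        conv_lhs => rw [List.flatten_append]
        conv_rhs => rw [hdecomp, List.flatten_append]
        simp [List.dropLast_append_of_ne_nil hlastne]
      · intro l hl
        rw [List.getLast?_append_of_ne_nil _ (by simp)] at hl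
        simp only [List.getLast?_singleton, Option.some.injEq] at hl
        rw [← hl, hyC_append _ _ hq hdl]
    · rw [if_neg hy, if_neg hy]
      apply ih
      · intro x hx; exact hrest x (by simp [hx])
      · simp
      · rw [← hflat]; simp
      · intro l hl
        rw [List.getLast?_append_of_ne_nil _ (by simp)] at hl
        simp only [List.getLast?_singleton, Option.some.injEq] at hl
        rw [← hl]
        exact hyC_append [' '] q hq (by simp)

lemma cleaned_map_toList (parts : List String) :
    (((parts.map PySem.Str.strip).filter (fun q => q ≠ "")).map String.toList)
      = cleanedC parts := by
  induction parts with
  | nil => rfl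
  | cons p ps ih =>
    simp only [List.map_cons, cleanedC] at *
    by_cases he : PySem.Str.strip p = ""
    · have h2 : PySem.Chars.strip p.toList = [] := by
        have := congrArg String.toList he
        simpa [PySem.Str.toList_strip] using this
      rw [List.filter_cons_of_neg (by simp [he]), List.filter_cons_of_neg (by simp [h2]), ih]
    · have h2 : PySem.Chars.strip p.toList ≠ [] := by
        intro h
        apply he
        apply String.toList_inj.mp
        simp [PySem.Str.toList_strip, h]
      rw [List.filter_cons_of_pos (by simp [he]), List.filter_cons_of_pos (by simp [h2])]
      simp only [List.map_cons, PySem.Str.toList_strip]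
      exact congrArg _ ih

lemma join_nil_toList (l : List String) :
    (PySem.Str.join "" l).toList = (l.map String.toList).flatten := by
  have h : ∀ m : List (List Char), PySem.Chars.join [] m = m.flatten := by
    intro m
    induction m with
    | nil => rfl
    | cons a t ih =>
      cases t <;> simp_all [PySem.Chars.join, List.intercalate, List.intersperse]
  simp [PySem.Str.join, h]

lemma toList_ne_nil_of_ne_empty (s : String) (h : s ≠ "") : s.toList ≠ [] := by
  intro hc
  exact h (String.toList_inj.mp (by simpa using hc))

-- ===== VERDICT (by name: the statement is the Claim_ definition above) =====
theorem merge_lines_with_hyphen_handling_spec : Claim_equal_merge_lines_with_hyphen_handling := by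
  intro parts _
  unfold Spec_merge_lines_with_hyphen_handling merge_lines_with_hyphen_handling
    merge_lines_with_hyphen_handling_alt
  apply String.toList_inj.mp
  by_cases hp : parts = []
  · subst hp; rfl
  · rw [if_neg hp]
    rw [join_nil_toList, foldA_toList parts []]
    cases hc : (parts.map PySem.Str.strip).filter (fun q => q ≠ "") with
    | nil =>
      have hcc : cleanedC parts = [] := by
        rw [← cleaned_map_toList, hc]; rfl
      simp [hcc]
    | cons c0 rest =>
      have hcc : cleanedC parts = c0.toList :: rest.map String.toList := by
        rw [← cleaned_map_toList, hc]; rfl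
      rw [hcc]
      rw [List.foldl_cons]
      have hfirst : stepAC ([].map String.toList) c0.toList = [c0.toList] := by rfl
      rw [hfirst]
      rw [foldB_toList]
      apply mainC
      · intro q hq
        obtain ⟨t, ht, htl⟩ := List.mem_map.mp hq
        have : t ≠ "" := by
          have hmem : t ∈ (parts.map PySem.Str.strip).filter (fun q => q ≠ "") := by
            rw [hc]; exact List.mem_cons_of_mem _ ht
          simpa using List.of_mem_filter hmem
        rw [← htl]
        exact toList_ne_nil_of_ne_empty t this
      · simp
      · simp
      · intro l hl
        simp only [List.getLast?_singleton, Option.some.injEq] at hl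
        rw [hl]
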